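-- pv_equiv track=rewrite | github.com/ch-vbelig/nn_buryat__asr | 00. old/old/mappings.py | get_phone_dict
-- ===== SOURCE A (Python) =====
-- def get_phone_dict(phones):
--     phone_to_index = {
--         "<SIL>": 0,
--         "<SPACE>": 1
--     }
--     n_classes = 2
--
--     for phone in phones:
--         if not phone in phone_to_index:
--             phone_to_index[phone] = n_classes
--             n_classes += 1
--
--     return phone_to_index
-- ===== SOURCE B (Python) =====
-- def get_phone_dict(phones):
--     base = {"<SIL>": 0, "<SPACE>": 1}
--     firsts = {}
--     for i, p in enumerate(phones):
--         if p not in base and p not in firsts: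
--             firsts[p] = i
--     return base | {p: 2 + sum(1 for j in firsts.values() if j < i)
--                    for p, i in firsts.items()}
-- ===== Notes on version B (the rewrite author's own statement) =====
-- stated objective: alternative
-- what changed: Replaces A's single-pass running-counter assignment with a rank-based algorithm: first record each new phone's first-occurrence position, then compute every phone's index as 2 plus the count of other first occurrences that precede it (order statistics instead of a mutable counter).
import Mathlib
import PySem

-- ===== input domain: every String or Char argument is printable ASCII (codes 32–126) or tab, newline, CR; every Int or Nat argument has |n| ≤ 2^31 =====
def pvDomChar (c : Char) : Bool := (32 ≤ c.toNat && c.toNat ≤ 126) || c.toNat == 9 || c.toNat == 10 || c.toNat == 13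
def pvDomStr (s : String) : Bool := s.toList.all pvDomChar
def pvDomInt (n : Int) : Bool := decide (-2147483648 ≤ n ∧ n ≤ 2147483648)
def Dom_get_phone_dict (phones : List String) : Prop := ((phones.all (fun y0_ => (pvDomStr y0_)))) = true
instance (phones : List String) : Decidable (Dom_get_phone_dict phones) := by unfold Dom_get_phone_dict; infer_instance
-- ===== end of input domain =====

-- B replaces A's single-pass running-counter loop by a rank computation: record first-occurrence positions, then each new phone's index is 2 plus the count of smaller first-occurrence positions (alternative algorithm, same result).


-- the reserved base mapping, shared literal
def pvBase : PySem.Dict String Int := (PySem.Dict.empty.insert "<SIL>" 0).insert "<SPACE>" 1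

-- ===== PORT A =====
def get_phone_dict (phones : List String) : List (String × Int) :=
  let phone_to_index : PySem.Dict String Int := pvBase
  let st := phones.foldl
    (fun (st : PySem.Dict String Int × Int) phone =>
      if !(st.1.contains phone) then (st.1.insert phone st.2, st.2 + 1) else st)
    (phone_to_index, 2)
  st.1.items

-- ===== PORT B =====
def get_phone_dict_alt (phones : List String) : List (String × Int) :=
  let base : PySem.Dict String Int := pvBase
  let firsts : PySem.Dict String Int :=
    (PySem.List.enumerate phones 0).foldl
      (fun (d : PySem.Dict String Int) ip =>
        if !(base.contains ip.2) && !(d.contains ip.2) then d.insert ip.2 ip.1 else d)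
      PySem.Dict.empty
  let comp : List (String × Int) := firsts.items.map
    (fun pi => (pi.1, (2 : Int) + ((firsts.values.filter (fun j => decide (j < pi.2))).length : Int)))
  (comp.foldl (fun (d : PySem.Dict String Int) kv => d.insert kv.1 kv.2) base).items

-- ===== PRECONDITION & SPEC =====
def Spec_get_phone_dict (phones : List String) (out : List (String × Int)) : Prop := out = get_phone_dict_alt phones
instance (phones : List String) (out : List (String × Int)) : Decidable (Spec_get_phone_dict phones out) := by unfold Spec_get_phone_dict; infer_instance

-- ===== CLAIM (what is proved, stated in full; the proofs are below) =====
def Claim_equal_get_phone_dict : Prop := ∀ (phones : List String), Dom_get_phone_dict phones → Spec_get_phone_dict phones (get_phone_dict phones)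

-- ===== LEMMAS AND PROOFS =====

-- filtering with a predicate that rejects p ignores a discard of p
theorem pv_filter_discard {α : Type} [DecidableEq α] (s : List α) (p : α)
    (pred : α → Bool) (h : pred p = false) :
    (PySem.Set.discard s p).filter pred = s.filter pred := by
  induction s with
  | nil => simp [PySem.Set.discard]
  | cons x xs ih =>
    by_cases hx : x = p
    · subst hx; simp [PySem.Set.discard, h] at *; simpa [h] using ih
    · simp [PySem.Set.discard, hx] at *
      by_cases hp : pred x <;> simp [hp, ih]

-- characterization of A's fold: it appends the new phones with consecutive indices
theorem pv_A_char (phones : List String) (d : PySem.Dict String Int) (n : Int) :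
    ((phones.foldl
      (fun (st : PySem.Dict String Int × Int) phone =>
        if !(st.1.contains phone) then (st.1.insert phone st.2, st.2 + 1) else st)
      (d, n)).1).items
    = d.items ++ (PySem.List.enumerate
        ((PySem.Set.ofList phones).filter (fun p => !(d.contains p))) n).map
        (fun ip => (ip.2, ip.1)) := by
  induction phones generalizing d n with
  | nil => simp
  | cons p ps ih =>
    by_cases h : d.contains p = true
    · have hfil : (PySem.Set.ofList (p :: ps)).filter (fun q => !(d.contains q))
           = (PySem.Set.ofList ps).filter (fun q => !(d.contains q)) := by
        rw [PySem.Set.ofList_cons]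
        simp only [List.filter_cons]
        rw [if_neg (by simp [h])]
        exact pv_filter_discard _ _ _ (by simp [h])
      simp only [List.foldl_cons]
      rw [if_neg (by simp [h]), hfil]
      exact ih d n
    · have h' : d.contains p = false := by simpa using h
      have hfil : (PySem.Set.ofList (p :: ps)).filter (fun q => !(d.contains q))
          = p :: ((PySem.Set.ofList ps).filter (fun q => !((d.insert p n).contains q))) := by
        rw [PySem.Set.ofList_cons]
        simp only [List.filter_cons]
        rw [if_pos (by simp [h'])]
        congr 1
        rw [← pv_filter_discard (PySem.Set.ofList ps) p
              (fun q => !((d.insert p n).contains q)) (by simp)]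
        apply List.filter_congr
        intro x hx
        have hxp : x ≠ p := by
          simp [PySem.Set.discard] at hx
          tauto
        simp [PySem.Dict.contains_insert, hxp]
      simp only [List.foldl_cons]
      rw [if_pos (by simp [h']), ih, hfil, PySem.List.enumerate_cons]
      simp [PySem.Dict.items_insert_of_not_contains, h']

-- characterization of B's first pass: it appends the new phones with their (strictly increasing) first-occurrence positions
theorem pv_firsts (phones : List String) (n : Int) (d : PySem.Dict String Int)
    (hub : ∀ x ∈ d.items, x.2 < n) (hpw : d.items.Pairwise (fun a b => a.2 < b.2)) :
    ∃ L : List (String × Int),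
      ((PySem.List.enumerate phones n).foldl
        (fun (d : PySem.Dict String Int) ip =>
          if !(pvBase.contains ip.2) && !(d.contains ip.2) then d.insert ip.2 ip.1 else d) d).items
        = d.items ++ L
      ∧ L.map Prod.fst
          = (PySem.Set.ofList phones).filter (fun p => !(pvBase.contains p) && !(d.contains p))
      ∧ (d.items ++ L).Pairwise (fun a b => a.2 < b.2) := by
  induction phones generalizing n d with
  | nil => exact ⟨[], by simp, by simp, by simpa using hpw⟩
  | cons p ps ih =>
    rw [PySem.List.enumerate_cons]
    simp only [List.foldl_cons]
    by_cases h : (!(pvBase.contains p) && !(d.contains p)) = true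
    · have hb : pvBase.contains p = false := by simp at h; simp [h.1]
      have hd : d.contains p = false := by simp at h; simp [h.2]
      rw [if_pos h]
      have hitems : (d.insert p n).items = d.items ++ [(p, n)] :=
        PySem.Dict.items_insert_of_not_contains d n hd
      have hub' : ∀ x ∈ (d.insert p n).items, x.2 < n + 1 := by
        rw [hitems]; intro x hx
        rcases List.mem_append.mp hx with hx | hx
        · exact lt_trans (hub x hx) (by omega)
        · simp at hx; subst hx; omega
      have hpw' : (d.insert p n).items.Pairwise (fun a b => a.2 < b.2) := by
        rw [hitems]
        exact List.pairwise_append.mpr ⟨hpw, List.pairwise_singleton _ _,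
          by intro a ha b hb; simp at hb; subst hb; exact hub a ha⟩
      obtain ⟨L', h1, h2, h3⟩ := ih (n + 1) (d.insert p n) hub' hpw'
      refine ⟨(p, n) :: L', ?_, ?_, ?_⟩
      · rw [h1, hitems, List.append_assoc]; rfl
      · rw [PySem.Set.ofList_cons]
        simp only [List.filter_cons]
        rw [if_pos h, List.map_cons]
        congr 1
        rw [h2, ← pv_filter_discard (PySem.Set.ofList ps) p
              (fun q => !(pvBase.contains q) && !((d.insert p n).contains q)) (by simp)]
        apply List.filter_congr
        intro x hx
        have hxp : x ≠ p := by
          simp [PySem.Set.discard] at hx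
          tauto
        rw [PySem.Dict.contains_insert,
          show (x == p) = false from beq_eq_false_iff_ne.mpr hxp]
        simp
      · have := h3; rw [hitems, List.append_assoc] at this; exact this
    · rw [if_neg h]
      obtain ⟨L, h1, h2, h3⟩ := ih (n + 1) d (fun x hx => lt_trans (hub x hx) (by omega)) hpw
      refine ⟨L, h1, ?_, h3⟩
      have h' : (!(pvBase.contains p) && !(d.contains p)) = false := by
        cases hh : (!(pvBase.contains p) && !(d.contains p)) with
        | true => exact absurd hh h
        | false => rfl
      rw [PySem.Set.ofList_cons]
      simp only [List.filter_cons]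
      rw [if_neg (by simp [h']),
        pv_filter_discard (PySem.Set.ofList ps) p
          (fun q => !(pvBase.contains q) && !(d.contains q)) h']
      exact h2

-- in a strictly increasing list, the number of elements below the k-th element is k
theorem pv_rank (vs : List Int) (hpw : vs.Pairwise (· < ·)) (k : Nat) (hk : k < vs.length) :
    (vs.filter (fun j => decide (j < vs[k]))).length = k := by
  have hlt := List.pairwise_iff_getElem.mp hpw
  have hsplit : vs.filter (fun j => decide (j < vs[k]))
      = (vs.take k).filter (fun j => decide (j < vs[k]))
        ++ (vs.drop k).filter (fun j => decide (j < vs[k])) := by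
    rw [← List.filter_append, List.take_append_drop]
  have h1 : (vs.take k).filter (fun j => decide (j < vs[k])) = vs.take k := by
    apply List.filter_eq_self.mpr
    intro x hx
    obtain ⟨i, hi, hix⟩ := List.mem_iff_getElem.mp hx
    have hi' : i < k := lt_of_lt_of_le hi (by simp)
    rw [← hix, List.getElem_take]
    exact decide_eq_true (hlt i k (by omega) hk hi')
  have h2 : (vs.drop k).filter (fun j => decide (j < vs[k])) = [] := by
    apply List.filter_eq_nil_iff.mpr
    intro x hx
    obtain ⟨i, hi, hix⟩ := List.mem_iff_getElem.mp hx
    have hki : k + i < vs.length := by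
      have := hi; simp [List.length_drop] at this; omega
    simp only [decide_eq_true_eq]
    rw [← hix, List.getElem_drop]
    rcases Nat.eq_zero_or_pos i with h0 | h0
    · subst h0; simp
    · have := hlt k (k + i) hk hki (by omega)
      omega
  rw [hsplit, h1, h2]
  simp [List.length_take]
  omega

-- characterization of B (stated on the zeta-expanded body of get_phone_dict_alt)
theorem pv_B_expl (phones : List String) :
    (((((PySem.List.enumerate phones 0).foldl
      (fun (d : PySem.Dict String Int) (ip : Int × String) =>
        if !(pvBase.contains ip.2) && !(d.contains ip.2) then d.insert ip.2 ip.1 else d)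
      PySem.Dict.empty).items.map
        (fun (pi : String × Int) => (pi.1, (2 : Int) + ((((PySem.List.enumerate phones 0).foldl
      (fun (d : PySem.Dict String Int) (ip : Int × String) =>
        if !(pvBase.contains ip.2) && !(d.contains ip.2) then d.insert ip.2 ip.1 else d)
      PySem.Dict.empty).values.filter (fun j => decide (j < pi.2))).length : Int)))).foldl
      (fun (d : PySem.Dict String Int) (kv : String × Int) => d.insert kv.1 kv.2) pvBase).items)
    = pvBase.items
      ++ (PySem.List.enumerate
          ((PySem.Set.ofList phones).filter (fun p => !(pvBase.contains p))) 2).map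
          (fun ip => (ip.2, ip.1)) := by
  set F : PySem.Dict String Int := (PySem.List.enumerate phones 0).foldl
      (fun (d : PySem.Dict String Int) (ip : Int × String) =>
        if !(pvBase.contains ip.2) && !(d.contains ip.2) then d.insert ip.2 ip.1 else d)
      PySem.Dict.empty with hF
  obtain ⟨L, h1, h2, h3⟩ := pv_firsts phones 0 PySem.Dict.empty
    (by intro x hx; simp [PySem.Dict.empty] at hx) (by simp [PySem.Dict.empty])
  have hL : F.items = L := by rw [hF]; simpa [PySem.Dict.empty] using h1
  have hV : F.values = L.map Prod.snd := by
    simp only [PySem.Dict.values, hL]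
  have h3' : L.Pairwise (fun a b => a.2 < b.2) := by simpa [PySem.Dict.empty] using h3
  have h2' : L.map Prod.fst
      = (PySem.Set.ofList phones).filter (fun p => !(pvBase.contains p)) := by
    rw [h2]; apply List.filter_congr; intro x _; simp
  rw [hL, hV]
  have hcomp : L.map (fun (pi : String × Int) =>
        (pi.1, (2 : Int) + (((L.map Prod.snd).filter (fun j => decide (j < pi.2))).length : Int)))
      = (PySem.List.enumerate (L.map Prod.fst) 2).map (fun ip => (ip.2, ip.1)) := by
    apply List.ext_getElem
    · simp [PySem.List.length_enumerate]
    · intro k hk1 hk2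
      have hk : k < L.length := by simpa using hk1
      have hpair : (L.map Prod.snd).Pairwise (· < ·) := List.pairwise_map.mpr h3'
      have hr := pv_rank (L.map Prod.snd) hpair k (by simpa using hk)
      simp only [List.getElem_map] at hr
      simp only [List.getElem_map, PySem.List.getElem_enumerate]
      rw [hr]
  rw [hcomp, h2']
  have hmapfst : (((PySem.List.enumerate
        ((PySem.Set.ofList phones).filter (fun p => !(pvBase.contains p))) 2).map
        (fun ip => (ip.2, ip.1))).map Prod.fst)
      = (PySem.Set.ofList phones).filter (fun p => !(pvBase.contains p)) := by
    rw [List.map_map]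
    have hcmp : (Prod.fst ∘ fun (ip : Int × String) => (ip.2, ip.1))
        = fun (ip : Int × String) => ip.2 := rfl
    rw [hcmp]
    exact PySem.List.map_snd_enumerate
      ((PySem.Set.ofList phones).filter (fun p => !(pvBase.contains p))) 2
  have hfresh : ∀ a ∈ (PySem.List.enumerate
        ((PySem.Set.ofList phones).filter (fun p => !(pvBase.contains p))) 2).map
        (fun ip => (ip.2, ip.1)), pvBase.contains a.1 = false := by
    intro a ha
    have hmem : a.1 ∈ (PySem.Set.ofList phones).filter (fun p => !(pvBase.contains p)) := by
      rw [← hmapfst]; exact List.mem_map_of_mem ha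
    have := List.of_mem_filter hmem
    simpa using this
  have hnd : (((PySem.List.enumerate
        ((PySem.Set.ofList phones).filter (fun p => !(pvBase.contains p))) 2).map
        (fun ip => (ip.2, ip.1))).map Prod.fst).Nodup := by
    rw [hmapfst]
    exact List.Nodup.filter _ (PySem.Set.nodup_ofList phones)
  have := PySem.Dict.items_foldl_insert_fresh
    (l := (PySem.List.enumerate
        ((PySem.Set.ofList phones).filter (fun p => !(pvBase.contains p))) 2).map
        (fun ip => (ip.2, ip.1)))
    (k := Prod.fst) (v := Prod.snd) (d := pvBase) hfresh hnd
  simpa using this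

theorem pv_B_char (phones : List String) :
    get_phone_dict_alt phones
    = pvBase.items
      ++ (PySem.List.enumerate
          ((PySem.Set.ofList phones).filter (fun p => !(pvBase.contains p))) 2).map
          (fun ip => (ip.2, ip.1)) :=
  pv_B_expl phones

-- ===== VERDICT (by name: the statement is the Claim_ definition above) =====
theorem get_phone_dict_spec : Claim_equal_get_phone_dict := by
  intro phones _
  show get_phone_dict phones = get_phone_dict_alt phones
  rw [pv_B_char]
  unfold get_phone_dict
  exact pv_A_char phones pvBase 2
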